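-- pv_equiv track=rewrite | github.com/ntvy-hcmus/hpdb_base | scripts/tools/vf.py | formatColor
-- ===== SOURCE A (Python) =====
-- def addColor(seg, color = 'red'):
--   return '<b style="color: %s;">%s</b>' % (color, seg)
--
-- def formatColor(str, seg, color = 'red'):
--   ok = False
--   pos = -1
--   while not ok:
--     pos = str.find(seg, pos + 1)
--     if pos == -1:
--       break
--     elif (pos == 0) or (str[pos - 1] != '>'):
--       ok = True
--       break
--
--   if not ok:
--     return str, False
--
--   return str[: pos] + addColor(seg, color) + str[pos + len(seg) :], True
-- ===== SOURCE B (Python) =====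
-- import re
--
-- def addColor(seg, color = 'red'):
--   return '<b style="color: %s;">%s</b>' % (color, seg)
--
-- def formatColor(str, seg, color = 'red'):
--   # regex search: literal seg with a negative lookbehind encoding "not preceded by '>'"
--   m = re.search('(?<!>)' + re.escape(seg), str)
--   if m is None:
--     return str, False
--   return str[:m.start()] + addColor(seg, color) + str[m.end():], True
-- ===== Notes on version B (the rewrite author's own statement) =====
-- stated objective: idiomatic
-- what changed: A's manual while/str.find loop that re-checks each occurrence's preceding character is replaced by a single regex search whose pattern '(?<!>)' + re.escape(seg) encodes the not-preceded-by-'>' condition as a negative lookbehind.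
import Mathlib
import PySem

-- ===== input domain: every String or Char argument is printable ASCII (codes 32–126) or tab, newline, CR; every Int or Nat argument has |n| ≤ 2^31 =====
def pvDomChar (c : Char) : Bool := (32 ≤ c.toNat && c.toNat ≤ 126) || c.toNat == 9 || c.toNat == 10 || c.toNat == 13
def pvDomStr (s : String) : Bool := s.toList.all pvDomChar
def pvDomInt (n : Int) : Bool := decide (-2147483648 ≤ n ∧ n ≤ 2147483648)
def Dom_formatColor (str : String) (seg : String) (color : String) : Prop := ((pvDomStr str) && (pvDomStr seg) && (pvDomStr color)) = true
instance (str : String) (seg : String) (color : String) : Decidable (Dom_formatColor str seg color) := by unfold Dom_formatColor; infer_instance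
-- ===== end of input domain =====

-- B replaces A's manual find/recheck retry loop by one regex search, '(?<!>)' + re.escape(seg):
-- the "not preceded by '>'" condition is encoded in the pattern; objective: idiomatic (same cost).

-- shared helper: addColor(seg, color) = '<b style="color: %s;">%s</b>' % (color, seg)
def addColorPort (seg : String) (color : String) : String :=
  "<b style=\"color: " ++ color ++ ";\">" ++ seg ++ "</b>"

-- ===== PORT A =====
-- A's while-loop: pos = str.find(seg, pos+1); break on -1; accept if pos==0 or str[pos-1] != '>'.
-- Encoded with start = pos+1 (starts at 0, i.e. Python's initial pos = -1); returns the accepted pos, none = not ok.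
-- The outer 'if hs' guard only makes the recursion total: for start > len(str), str.find returns -1 (CPython), i.e. none.
def fcLoop (s g : List Char) (start : Nat) : Option Nat :=
  if hs : start ≤ s.length then
    let pos := PySem.Chars.findFrom s g (start : Int) none
    if hpos : pos = -1 then none
    else if pos = 0 ∨ s[pos.toNat - 1]! ≠ '>' then some pos.toNat
    else fcLoop s g (pos.toNat + 1)
  else none
termination_by s.length + 1 - start
decreasing_by
  have h := PySem.Chars.findFrom_natCast_spec s g start hs hpos
  omega

def formatColor (str : String) (seg : String) (color : String) : String × Bool :=
  let s := str.toList
  let g := seg.toList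
  match fcLoop s g 0 with
  | none => (str, false)
  | some p => (String.ofList (s.take p) ++ addColorPort seg color ++ String.ofList (s.drop (p + g.length)), true)

-- ===== PORT B =====
-- B's re.search('(?<!>)' + re.escape(seg), str): the leftmost position where the literal seg matches
-- and the negative lookbehind holds (i == 0, or the preceding char is not '>'); none = no match.
def formatColor_alt (str : String) (seg : String) (color : String) : String × Bool :=
  let s := str.toList
  let g := seg.toList
  match (List.range (s.length + 1)).find?
      (fun i => decide (g <+: s.drop i) && (i == 0 || s[i - 1]! != '>')) with
  | none => (str, false)
  | some i => (String.ofList (s.take i) ++ addColorPort seg color ++ String.ofList (s.drop (i + g.length)), true)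

-- ===== PRECONDITION & SPEC =====
def Spec_formatColor (str : String) (seg : String) (color : String) (out : String × Bool) : Prop := out = formatColor_alt str seg color
instance (str : String) (seg : String) (color : String) (out : String × Bool) : Decidable (Spec_formatColor str seg color out) := by unfold Spec_formatColor; infer_instance

-- ===== CLAIM (what is proved, stated in full; the proofs are below) =====
def Claim_equal_formatColor : Prop := ∀ (str : String) (seg : String) (color : String), Dom_formatColor str seg color → Spec_formatColor str seg color (formatColor str seg color)

-- ===== LEMMAS AND PROOFS =====

-- proof-side helper: a step-by-step scan, the bridge between A's retry loop and B's leftmost match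
def scanLoop (s g : List Char) (i : Nat) : Option Nat :=
  if i + g.length ≤ s.length then
    if ((s.drop i).take g.length == g) && (i == 0 || s[i - 1]! != '>') then some i
    else scanLoop s g (i + 1)
  else none
termination_by s.length + 1 - i
decreasing_by omega

lemma prefix_drop_infix (s g : List Char) (k j : Nat) (hk : k ≤ j) (h : g <+: s.drop j) :
    g <:+: s.drop k := by
  have heq : s.drop j = (s.drop k).drop (j - k) := by rw [List.drop_drop]; congr 1; omega
  rw [heq] at h
  exact List.infix_iff_prefix_suffix.mpr ⟨_, h, List.drop_suffix _ _⟩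

lemma scan_none (s g : List Char) (start : Nat)
    (h : ∀ j, start ≤ j → ¬ g <+: s.drop j) : scanLoop s g start = none := by
  unfold scanLoop
  split_ifs with hg hc
  · exfalso
    have htake : List.take g.length (List.drop start s) = g := by
      simp only [Bool.and_eq_true, beq_iff_eq] at hc
      exact hc.1
    exact h start le_rfl (htake ▸ List.take_prefix _ _)
  · exact scan_none s g (start + 1) (fun j hj => h j (by omega))
  · rfl
termination_by s.length + 1 - start
decreasing_by omega

lemma scan_skip (s g : List Char) (start p : Nat) (hle : start ≤ p)
    (h : ∀ j, start ≤ j → j < p → ¬ g <+: s.drop j) :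
    scanLoop s g start = scanLoop s g p := by
  rcases Nat.eq_or_lt_of_le hle with rfl | hlt
  · rfl
  · have hstep : scanLoop s g start = scanLoop s g (start + 1) := by
      conv_lhs => unfold scanLoop
      split_ifs with hg hc
      · exfalso
        have htake : List.take g.length (List.drop start s) = g := by
          simp only [Bool.and_eq_true, beq_iff_eq] at hc
          exact hc.1
        exact h start le_rfl hlt (htake ▸ List.take_prefix _ _)
      · rfl
      · conv_rhs => unfold scanLoop
        rw [if_neg (by omega)]
    rw [hstep]
    exact scan_skip s g (start + 1) p (by omega) (fun j hj => h j (by omega))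
termination_by p - start
decreasing_by omega

lemma loop_eq (s g : List Char) (start : Nat) : fcLoop s g start = scanLoop s g start := by
  unfold fcLoop
  split
  · rename_i hs
    dsimp only
    split
    · rename_i hneg
      have hno : ¬ (g <:+: s.drop start) :=
        (PySem.Chars.findFrom_natCast_eq_neg_one_iff s g start hs).mp hneg
      rw [scan_none]
      intro j hj hpref
      exact hno (prefix_drop_infix s g start j hj hpref)
    · rename_i hneg
      obtain ⟨hge, hpref, hmin⟩ := PySem.Chars.findFrom_natCast_spec s g start hs hneg
      have hcast := PySem.Chars.findFrom_natCast s g start hs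
      set f := PySem.Chars.findFrom s g (start : Int) none with hf
      have hge' : start ≤ f.toNat := by omega
      have hfle : f.toNat ≤ s.length := by
        by_cases hff : PySem.Chars.find (List.drop start s) g = -1
        · exact absurd (by rw [hcast, if_pos hff]) hneg
        · have h1 := PySem.Chars.find_le_length (List.drop start s) g
          rw [if_neg hff] at hcast
          simp only [List.length_drop] at h1
          omega
      have hlen := hpref.length_le
      simp only [List.length_drop] at hlen
      have hguard : f.toNat + g.length ≤ s.length := by omega
      have htake : ((s.drop f.toNat).take g.length == g) = true :=
        beq_iff_eq.mpr (List.prefix_iff_eq_take.mp hpref).symm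
      have hskip : scanLoop s g start = scanLoop s g f.toNat :=
        scan_skip s g start f.toNat hge' (fun j hj hjlt => hmin j hj hjlt)
      split
      · rename_i hcond
        rw [hskip]
        conv_rhs => unfold scanLoop
        rw [if_pos hguard, if_pos]
        rw [Bool.and_eq_true]
        refine ⟨htake, ?_⟩
        rw [Bool.or_eq_true, beq_iff_eq, bne_iff_ne]
        rcases hcond with h0 | hch
        · exact Or.inl (by omega)
        · exact Or.inr hch
      · rename_i hcond
        push Not at hcond
        rw [loop_eq s g (f.toNat + 1), hskip]
        conv_rhs => unfold scanLoop
        rw [if_pos hguard, if_neg]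
        rw [Bool.and_eq_true, not_and]
        intro _
        rw [Bool.or_eq_true, beq_iff_eq, bne_iff_ne]
        rw [not_or, not_not]
        exact ⟨by omega, hcond.2⟩
  · rename_i hs
    conv_rhs => unfold scanLoop
    rw [if_neg (by omega)]
termination_by s.length + 1 - start
decreasing_by omega

-- the scan equals the leftmost match that B's regex search returns
lemma scan_eq_find (s g : List Char) (start : Nat) (h : start ≤ s.length + 1) :
    scanLoop s g start = (List.range' start (s.length + 1 - start)).find?
      (fun i => decide (g <+: s.drop i) && (i == 0 || s[i - 1]! != '>')) := by
  have hpref : ∀ i, ((s.drop i).take g.length == g) = decide (g <+: s.drop i) := by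
    intro i
    cases hd : decide (g <+: s.drop i) with
    | true =>
      have hp := of_decide_eq_true hd
      simp [(List.prefix_iff_eq_take.mp hp).symm]
    | false =>
      have hp := of_decide_eq_false hd
      simp only [beq_eq_false_iff_ne, ne_eq]
      intro heq
      exact hp (List.prefix_iff_eq_take.mpr heq.symm)
  unfold scanLoop
  by_cases hg : start + g.length ≤ s.length
  · rw [if_pos hg]
    have hk : s.length + 1 - start = (s.length - start) + 1 := by omega
    rw [hk, List.range'_succ, hpref start]
    by_cases hc : (decide (g <+: s.drop start) && ((start == 0 : Bool) || s[start - 1]! != '>')) = true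
    · rw [if_pos hc, List.find?_cons_of_pos (by exact hc)]
    · rw [if_neg hc, List.find?_cons_of_neg (by simpa using hc)]
      rw [scan_eq_find s g (start + 1) (by omega)]
      have he : s.length + 1 - (start + 1) = s.length - start := by omega
      rw [he]
  · rw [if_neg hg]
    symm
    rw [List.find?_eq_none]
    intro x hx
    have hmem := List.mem_range'_1.mp hx
    simp only [Bool.and_eq_true, decide_eq_true_iff, not_and]
    intro hp
    have := hp.length_le
    simp only [List.length_drop] at this
    omega
termination_by s.length + 1 - start
decreasing_by omega

-- ===== VERDICT (by name: the statement is the Claim_ definition above) =====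
theorem formatColor_spec : Claim_equal_formatColor := by
  intro str seg color _
  unfold Spec_formatColor
  simp only [formatColor, formatColor_alt]
  rw [loop_eq, scan_eq_find _ _ 0 (by omega), List.range_eq_range', Nat.sub_zero]
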